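-- pv_equiv track=rewrite | github.com/Godqwerty15/HYTCode | 예쁜 숫자.py | check
-- ===== SOURCE A (Python) =====
-- def check(p, n):
--     pretty_dict = {}
--     while n != 0:
--         temp = 1
--         try_num = 0
--         while(temp <= n):
--             temp *= p
--             try_num += 1
--         n -= temp // p
--         if try_num not in pretty_dict:
--             pretty_dict[try_num] = 1
--         else:
--             pretty_dict[try_num] += 1
--     if len(pretty_dict) == 2:
--         one_count = 0
--         two_count = 0
--         other_count = 0
--         for item in pretty_dict:
--             if pretty_dict[item] == 1:
--                 one_count += 1
--             elif pretty_dict[item] == 2: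
--                 two_count += 1
--             else:
--                 other_count += 1
--         if one_count == 1 and two_count == 1:
--             return 1
--         elif one_count == 2:
--             return 1
--         else:
--             return 0
--     else:
--         count_two = 0
--         count_one = 0
--         count_other = 0
--         for item in pretty_dict:
--             if pretty_dict[item] == 1:
--                 count_one += 1
--             elif pretty_dict[item] == 2:
--                 count_two += 1
--             else:
--                 count_other += 1
--         if count_one == 1 and count_two >= 2 and count_other == 0:
--             return 1
--         else:
--             return 0
-- ===== SOURCE B (Python) =====
-- def check(p, n):
--     ones = twos = others = nonzero = 0
--     while n != 0:
--         n, d = divmod(n, p)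
--         if d != 0:
--             nonzero += 1
--             if d == 1:
--                 ones += 1
--             elif d == 2:
--                 twos += 1
--             else:
--                 others += 1
--     if nonzero == 2:
--         return 1 if ones == 2 or (ones == 1 and twos == 1) else 0
--     return 1 if ones == 1 and twos >= 2 and others == 0 else 0
-- ===== Notes on version B (the rewrite author's own statement) =====
-- stated objective: faster
-- what changed: A repeatedly finds the leading power of p by an inner multiplication loop and subtracts it once per unit of every digit, tallying positions in a dict; B converts n to base p in a single least-significant-first divmod pass keeping only four counters (digits equal to 1, equal to 2, other nonzero, and nonzero count).
-- outside the precondition, e.g. on check(-1, -3): A returns 0, B does not finish within the time limit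
import Mathlib
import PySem

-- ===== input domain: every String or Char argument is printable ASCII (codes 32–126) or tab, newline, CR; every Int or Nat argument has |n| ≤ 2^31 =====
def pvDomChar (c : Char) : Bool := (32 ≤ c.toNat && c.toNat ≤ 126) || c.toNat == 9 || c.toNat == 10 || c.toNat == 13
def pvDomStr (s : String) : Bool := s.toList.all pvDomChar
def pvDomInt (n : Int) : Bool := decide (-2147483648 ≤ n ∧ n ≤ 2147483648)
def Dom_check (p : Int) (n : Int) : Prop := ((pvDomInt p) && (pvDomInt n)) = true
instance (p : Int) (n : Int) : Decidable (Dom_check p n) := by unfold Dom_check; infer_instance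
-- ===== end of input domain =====

-- B replaces A's repeated subtract-the-leading-power search (which walks the powers of p once
-- per unit of every digit) by a single least-significant-first divmod pass that only keeps four
-- counters; measurably faster, asymptotically so for large bases.

-- ===== PORT A =====
-- inner 'while temp <= n' loop; fuel makes it total (A diverges outside Pre_check)
def checkInner (p n : Int) : Nat → Int → Int → Int × Int
  | 0, temp, tryNum => (temp, tryNum)
  | f + 1, temp, tryNum =>
    if temp ≤ n then checkInner p n f (temp * p) (tryNum + 1) else (temp, tryNum)

-- outer 'while n != 0' loop building pretty_dict; fuel makes it total
def checkLoop (p : Int) : Nat → Int → PySem.Dict Int Int → PySem.Dict Int Int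
  | 0, _, d => d
  | f + 1, n, d =>
    if n ≠ 0 then
      let t := checkInner p n (n.natAbs + 1) 1 0
      let n' := n - PySem.Int.floordiv t.1 p
      let d' := if d.contains t.2 = false then d.insert t.2 1
                else d.insert t.2 (d.getD t.2 0 + 1)
      checkLoop p f n' d'
    else d

def check (p : Int) (n : Int) : Int :=
  let d := checkLoop p (n.natAbs + 1) n PySem.Dict.empty
  if d.size = 2 then
    let c := d.keys.foldl (fun c k =>
      if d.getD k 0 = 1 then (c.1 + 1, c.2.1, c.2.2)
      else if d.getD k 0 = 2 then (c.1, c.2.1 + 1, c.2.2)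
      else (c.1, c.2.1, c.2.2 + 1)) ((0 : Int), (0 : Int), (0 : Int))
    if c.1 = 1 ∧ c.2.1 = 1 then 1
    else if c.1 = 2 then 1
    else 0
  else
    let c := d.keys.foldl (fun c k =>
      if d.getD k 0 = 1 then (c.1 + 1, c.2.1, c.2.2)
      else if d.getD k 0 = 2 then (c.1, c.2.1 + 1, c.2.2)
      else (c.1, c.2.1, c.2.2 + 1)) ((0 : Int), (0 : Int), (0 : Int))
    if c.1 = 1 ∧ 2 ≤ c.2.1 ∧ c.2.2 = 0 then 1 else 0

-- ===== PORT B =====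
-- single divmod pass keeping four counters; fuel makes it total (B diverges only outside Pre_check)
def checkAltLoop (p : Int) : Nat → Int → Int → Int → Int → Int → Int × Int × Int × Int
  | 0, _, ones, twos, others, nonzero => (ones, twos, others, nonzero)
  | f + 1, n, ones, twos, others, nonzero =>
    if n = 0 then (ones, twos, others, nonzero)
    else
      let q := PySem.Int.floordiv n p
      let d := PySem.Int.mod n p
      if d ≠ 0 then
        if d = 1 then checkAltLoop p f q (ones + 1) twos others (nonzero + 1)
        else if d = 2 then checkAltLoop p f q ones (twos + 1) others (nonzero + 1)
        else checkAltLoop p f q ones twos (others + 1) (nonzero + 1)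
      else checkAltLoop p f q ones twos others nonzero

def check_alt (p : Int) (n : Int) : Int :=
  let r := checkAltLoop p (2 * n.natAbs + 2) n 0 0 0 0
  if r.2.2.2 = 2 then
    if r.1 = 2 ∨ (r.1 = 1 ∧ r.2.1 = 1) then 1 else 0
  else
    if r.1 = 1 ∧ 2 ≤ r.2.1 ∧ r.2.2.1 = 0 then 1 else 0

-- ===== PRECONDITION & SPEC =====
-- Pre_check excludes the inputs where A diverges (p ≤ 1 with n > 0; p ≥ 0 with n < 0, except it
-- raises ZeroDivisionError at p = 0, n < 0) and the line p = -1, n < 0, where A's returned 0 is an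
-- accidental count-up artefact (1 // -1 = -1 keeps incrementing n) on which B's divmod loop diverges.
def Pre_check (p : Int) (n : Int) : Prop := (2 ≤ p ∧ 0 ≤ n) ∨ n = 0 ∨ (p ≤ -2 ∧ n ≤ 0)
instance (p : Int) (n : Int) : Decidable (Pre_check p n) := by unfold Pre_check; infer_instance
def pvWitness_check : Int × Int := (2, 12)
def Spec_check (p : Int) (n : Int) (out : Int) : Prop := out = check_alt p n
instance (p : Int) (n : Int) (out : Int) : Decidable (Spec_check p n out) := by unfold Spec_check; infer_instance

-- ===== CLAIM (what is proved, stated in full; the proofs are below) =====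
def Claim_equal_check : Prop := ∀ (p : Int) (n : Int), Dom_check p n → Pre_check p n → Spec_check p n (check p n)

-- ===== LEMMAS AND PROOFS =====

-- base-p digits of n, least significant first (fuel-indexed)
def digsF (p : Int) : Nat → Int → List Int
  | 0, _ => []
  | f + 1, n => if n = 0 then [] else PySem.Int.mod n p :: digsF p f (PySem.Int.floordiv n p)

def Digs (p n : Int) : List Int := digsF p (n.toNat + 1) n

-- the (key, value) pairs A's loop inserts: (position+1, digit) for nonzero digits, leading first
def entriesAux : List Int → Nat → List (Int × Int)
  | [], _ => []
  | d :: rest, i => entriesAux rest (i + 1) ++ (if d ≠ 0 then [(((i : Int) + 1), d)] else [])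

def entries (l : List Int) : List (Int × Int) := entriesAux l 0

lemma entries_nil : entries [] = [] := rfl

def cnt1 (l : List Int) : Nat := l.count 1
def cnt2 (l : List Int) : Nat := l.count 2
def cntO (l : List Int) : Nat := l.countP (fun x => !(x == 0) && !(x == 1) && !(x == 2))
def cntN (l : List Int) : Nat := l.countP (fun x => !(x == 0))
def cntE (l : List Int) : Nat := l.countP (fun x => !(x == 1) && !(x == 2))

lemma checkLoop_zero (p : Int) (f : Nat) (d : PySem.Dict Int Int) :
    checkLoop p f 0 d = d := by cases f <;> simp [checkLoop]

lemma innerLemma (p n : Int) (L : Nat) (hp : 2 ≤ p) (hL : p ^ L ≤ n) (hU : n < p ^ (L + 1)) :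
    ∀ (fuel j : Nat), j ≤ L + 1 → L + 1 - j ≤ fuel →
      checkInner p n fuel (p ^ j) (j : Int) = (p ^ (L + 1), (L : Int) + 1) := by
  intro fuel
  induction fuel with
  | zero =>
    intro j hj hf
    have : j = L + 1 := by omega
    subst this
    simp [checkInner]
  | succ f ih =>
    intro j hj hf
    by_cases h : p ^ j ≤ n
    · have hjL : j < L + 1 := by
        have : p ^ j < p ^ (L + 1) := lt_of_le_of_lt h hU
        exact (pow_lt_pow_iff_right₀ (by omega : (1:Int) < p)).mp this
      have : checkInner p n (f + 1) (p ^ j) (j : Int) =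
          checkInner p n f (p ^ j * p) ((j : Int) + 1) := by
        simp [checkInner, h]
      rw [this, ← pow_succ]
      have hcast : ((j : Int) + 1) = ((j + 1 : Nat) : Int) := by push_cast; ring
      rw [hcast]
      exact ih (j + 1) (by omega) (by omega)
    · have hLj : L < j := by
        have : p ^ L < p ^ j := lt_of_le_of_lt hL (by omega)
        exact (pow_lt_pow_iff_right₀ (by omega : (1:Int) < p)).mp this
      have : j = L + 1 := by omega
      subst this
      simp [checkInner, h]

lemma fuelBound (p n : Int) (L : Nat) (hp : 2 ≤ p) (hL : p ^ L ≤ n) : L + 1 ≤ n.natAbs := by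
  have h2 : (2 : Int) ^ L ≤ p ^ L := pow_le_pow_left₀ (by omega) hp L
  have hn : ((2 ^ L : Nat) : Int) ≤ n := by push_cast; exact le_trans h2 hL
  have h0 : 0 ≤ n := le_trans (by positivity) hn
  have : (2 ^ L : Nat) ≤ n.natAbs := by omega
  have := Nat.lt_two_pow_self (n := L)
  omega

lemma Astep (p : Int) (L : Nat) (a c : Int) (hp : 2 ≤ p) (h0 : 0 ≤ a) (ha : a < p ^ L)
    (hc : 1 ≤ c) (hU : a + c * p ^ L < p ^ (L + 1)) (d : PySem.Dict Int Int) (f : Nat) :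
    checkLoop p (f + 1) (a + c * p ^ L) d =
      checkLoop p f (a + (c - 1) * p ^ L)
        (if d.contains ((L : Int) + 1) = false then d.insert ((L : Int) + 1) 1
         else d.insert ((L : Int) + 1) (d.getD ((L : Int) + 1) 0 + 1)) := by
  have hP : (0:Int) < p ^ L := pow_pos (by omega) L
  have hL : p ^ L ≤ a + c * p ^ L := by nlinarith
  have hne : a + c * p ^ L ≠ 0 := by nlinarith
  have hinner : checkInner p (a + c * p ^ L) ((a + c * p ^ L).natAbs + 1) 1 0 =
      (p ^ (L + 1), (L : Int) + 1) := by
    have := innerLemma p (a + c * p ^ L) L hp hL hU ((a + c * p ^ L).natAbs + 1) 0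
      (by omega) (by have := fuelBound p (a + c * p ^ L) L hp hL; omega)
    simpa using this
  have hdiv : PySem.Int.floordiv (p ^ (L + 1)) p = p ^ L := by
    rw [PySem.Int.floordiv_eq_ediv_of_pos (by omega), pow_succ]
    exact Int.mul_ediv_cancel _ (by omega)
  show (if (a + c * p ^ L) ≠ 0 then _ else d) = _
  rw [if_pos hne]
  simp only [hinner, hdiv]
  congr 1
  ring

lemma AgroupIn (p : Int) (L : Nat) (hp : 2 ≤ p) :
    ∀ (c : Nat) (a v : Int) (d : PySem.Dict Int Int) (f : Nat), 0 ≤ a → a < p ^ L →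
      a + ((c : Int) + 1) * p ^ L < p ^ (L + 1) → d.get? ((L : Int) + 1) = some v → c + 1 ≤ f →
      checkLoop p f (a + ((c : Int) + 1) * p ^ L) d =
        checkLoop p (f - (c + 1)) a (d.insert ((L : Int) + 1) (v + ((c : Int) + 1))) := by
  intro c
  induction c with
  | zero =>
    intro a v d f h0 ha hU hget hf
    obtain ⟨f', rfl⟩ : ∃ f', f = f' + 1 := ⟨f - 1, by omega⟩
    have hcont : d.contains ((L : Int) + 1) = true := by
      rw [PySem.Dict.contains_eq_isSome_get?, hget]; rfl
    have hgetD : d.getD ((L : Int) + 1) 0 = v := by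
      rw [PySem.Dict.getD_eq_get?_getD, hget]; rfl
    have hz : ((0:Nat):Int) + 1 = (1:Int) := by norm_num
    rw [hz] at hU ⊢
    rw [Astep p L a 1 hp h0 ha (by omega) hU d f']
    rw [hcont]
    simp [hgetD]
  | succ c ih =>
    intro a v d f h0 ha hU hget hf
    obtain ⟨f', rfl⟩ : ∃ f', f = f' + 1 := ⟨f - 1, by omega⟩
    have hP : (0:Int) < p ^ L := pow_pos (by omega) L
    have hcont : d.contains ((L : Int) + 1) = true := by
      rw [PySem.Dict.contains_eq_isSome_get?, hget]; rfl
    have hgetD : d.getD ((L : Int) + 1) 0 = v := by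
      rw [PySem.Dict.getD_eq_get?_getD, hget]; rfl
    have h1 : (((c + 1 : Nat) : Int) + 1) = ((c : Int) + 1) + 1 := by push_cast; ring
    rw [h1, Astep p L a ((c : Int) + 1 + 1) hp h0 ha (by omega) (by rw [← h1]; exact hU) d f']
    rw [hcont]
    simp only [Bool.true_eq_false, if_false, hgetD]
    have harith : a + ((c : Int) + 1 + 1 - 1) * p ^ L = a + ((c : Int) + 1) * p ^ L := by ring
    rw [harith,
      ih a (v + 1) (d.insert ((L : Int) + 1) (v + 1)) f' h0 ha (by nlinarith)
        (PySem.Dict.get?_insert_self _ _ _) (by omega)]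
    rw [PySem.Dict.insert_insert_self]
    have : f' + 1 - (c + 1 + 1) = f' - (c + 1) := by omega
    rw [this]
    congr 2
    ring

lemma Agroup (p : Int) (L : Nat) (hp : 2 ≤ p) (c : Nat) (a : Int) (d : PySem.Dict Int Int)
    (f : Nat) (h0 : 0 ≤ a) (ha : a < p ^ L) (hU : a + ((c : Int) + 1) * p ^ L < p ^ (L + 1))
    (hd : d.get? ((L : Int) + 1) = none) (hf : c + 1 ≤ f) :
    checkLoop p f (a + ((c : Int) + 1) * p ^ L) d =
      checkLoop p (f - (c + 1)) a (d.insert ((L : Int) + 1) ((c : Int) + 1)) := by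
  obtain ⟨f', rfl⟩ : ∃ f', f = f' + 1 := ⟨f - 1, by omega⟩
  have hP : (0:Int) < p ^ L := pow_pos (by omega) L
  have hcont : d.contains ((L : Int) + 1) = false := by
    rw [PySem.Dict.contains_eq_isSome_get?, hd]; rfl
  rw [Astep p L a ((c : Int) + 1) hp h0 ha (by omega) hU d f']
  rw [hcont]
  simp only [if_true]
  have harith : a + ((c : Int) + 1 - 1) * p ^ L = a + (c : Int) * p ^ L := by ring
  rw [harith]
  cases c with
  | zero =>
    simp [checkLoop]
  | succ c' =>
    have h1 : ((c' + 1 : Nat) : Int) = (c' : Int) + 1 := by push_cast; ring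
    rw [h1]
    rw [AgroupIn p L hp c' a 1 (d.insert ((L : Int) + 1) 1) f' h0 ha
      (by nlinarith) (PySem.Dict.get?_insert_self _ _ _) (by omega)]
    rw [PySem.Dict.insert_insert_self]
    have : f' + 1 - (c' + 1 + 1) = f' - (c' + 1) := by omega
    rw [this]
    congr 2
    ring

lemma digsF_stable (p : Int) (hp : 2 ≤ p) :
    ∀ (N : Nat) (n : Int), 0 ≤ n → n.toNat ≤ N → ∀ f g : Nat, N < f → N < g →
      digsF p f n = digsF p g n := by
  intro N
  induction N with
  | zero =>
    intro n h0 hN f g hf hg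
    have : n = 0 := by omega
    subst this
    obtain ⟨f', rfl⟩ : ∃ f', f = f' + 1 := ⟨f - 1, by omega⟩
    obtain ⟨g', rfl⟩ : ∃ g', g = g' + 1 := ⟨g - 1, by omega⟩
    simp [digsF]
  | succ N ih =>
    intro n h0 hN f g hf hg
    obtain ⟨f', rfl⟩ : ∃ f', f = f' + 1 := ⟨f - 1, by omega⟩
    obtain ⟨g', rfl⟩ : ∃ g', g = g' + 1 := ⟨g - 1, by omega⟩
    by_cases hn : n = 0
    · simp [digsF, hn]
    · have hdiv : PySem.Int.floordiv n p = n / p := PySem.Int.floordiv_eq_ediv_of_pos (by omega)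
      have hlt : n / p < n := by
        have h0' : 0 < n := by omega
        have hm := mul_lt_mul_of_pos_left (show (1:Int) < p by omega) h0'
        exact Int.ediv_lt_of_lt_mul (by omega) (by linarith)
      have hge : 0 ≤ n / p := Int.ediv_nonneg h0 (by omega)
      simp only [digsF, if_neg hn, hdiv]
      congr 1
      exact ih (n / p) hge (by omega) f' g' (by omega) (by omega)

lemma Digs_zero (p : Int) : Digs p 0 = [] := by simp [Digs, digsF]

lemma Digs_pos (p n : Int) (hp : 2 ≤ p) (hn : 0 < n) :
    Digs p n = PySem.Int.mod n p :: Digs p (PySem.Int.floordiv n p) := by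
  have hdiv : PySem.Int.floordiv n p = n / p := PySem.Int.floordiv_eq_ediv_of_pos (by omega)
  have hlt : n / p < n := by
    have hm := mul_lt_mul_of_pos_left (show (1:Int) < p by omega) hn
    exact Int.ediv_lt_of_lt_mul (by omega) (by linarith)
  have hge : 0 ≤ n / p := Int.ediv_nonneg (by omega) (by omega)
  show digsF p (n.toNat + 1) n = _
  simp only [digsF, if_neg (by omega : ¬ n = 0)]
  congr 1
  rw [hdiv]
  exact digsF_stable p hp (n/p).toNat (n/p) hge le_rfl n.toNat ((n/p).toNat + 1)
    (by omega) (by omega)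

lemma lenDigs (p : Int) (hp : 2 ≤ p) :
    ∀ (L : Nat) (a : Int), 0 ≤ a → a < p ^ L → (Digs p a).length ≤ L := by
  intro L
  induction L with
  | zero =>
    intro a h0 ha
    have : a = 0 := by simp at ha; omega
    subst this
    simp [Digs, digsF]
  | succ L ih =>
    intro a h0 ha
    by_cases hz : a = 0
    · subst hz; simp [Digs, digsF]
    · rw [Digs_pos p a hp (by omega)]
      have hdiv : PySem.Int.floordiv a p = a / p := PySem.Int.floordiv_eq_ediv_of_pos (by omega)
      rw [hdiv]
      simp only [List.length_cons]
      have : a / p < p ^ L := by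
        rw [Int.ediv_lt_iff_lt_mul (by omega), ← pow_succ]
        exact ha
      have := ih (a / p) (Int.ediv_nonneg h0 (by omega)) this
      omega

lemma digLem (p : Int) (hp : 2 ≤ p) :
    ∀ (L : Nat) (a c : Int), 0 ≤ a → a < p ^ L → 1 ≤ c → c < p →
      Digs p (a + c * p ^ L) =
        Digs p a ++ List.replicate (L - (Digs p a).length) 0 ++ [c] := by
  intro L
  induction L with
  | zero =>
    intro a c h0 ha hc hcp
    have haz : a = 0 := by simp at ha; omega
    subst haz
    simp only [pow_zero, mul_one, zero_add, Digs_zero, List.nil_append, List.length_nil,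
      Nat.sub_zero, List.replicate_zero]
    rw [Digs_pos p c hp (by omega)]
    have hm : PySem.Int.mod c p = c := by
      rw [PySem.Int.mod_eq_emod_of_pos (by omega)]
      exact Int.emod_eq_of_lt (by omega) hcp
    have hd : PySem.Int.floordiv c p = 0 := by
      rw [PySem.Int.floordiv_eq_ediv_of_pos (by omega)]
      exact Int.ediv_eq_zero_of_lt (by omega) hcp
    rw [hm, hd, Digs_zero]
  | succ L ih =>
    intro a c h0 ha hc hcp
    have hP : (0:Int) < p ^ L := pow_pos (by omega) L
    have hn : 0 < a + c * p ^ (L+1) := by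
      have : (0:Int) < p ^ (L+1) := pow_pos (by omega) (L+1)
      nlinarith
    have hrw : a + c * p ^ (L+1) = a + p * (c * p ^ L) := by ring
    rw [Digs_pos p _ hp hn]
    have hm : PySem.Int.mod (a + c * p ^ (L+1)) p = PySem.Int.mod a p := by
      rw [PySem.Int.mod_eq_emod_of_pos (by omega), PySem.Int.mod_eq_emod_of_pos (by omega),
        hrw]
      rw [mul_comm p (c * p ^ L)]
      exact Int.add_mul_emod_self_right _ _ _
    have hd : PySem.Int.floordiv (a + c * p ^ (L+1)) p = a / p + c * p ^ L := by
      rw [PySem.Int.floordiv_eq_ediv_of_pos (by omega), hrw]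
      exact Int.add_mul_ediv_left a _ (by omega)
    rw [hm, hd]
    have hap_lt : a / p < p ^ L := by
      rw [Int.ediv_lt_iff_lt_mul (by omega), ← pow_succ]
      exact ha
    have hap0 : 0 ≤ a / p := Int.ediv_nonneg h0 (by omega)
    rw [ih (a / p) c hap0 hap_lt hc hcp]
    by_cases hz : a = 0
    · subst hz
      rw [PySem.Int.mod_eq_emod_of_pos (by omega)]
      simp [Digs_zero, List.replicate_succ]
    · have hpos : 0 < a := by omega
      rw [Digs_pos p a hp hpos]
      have hfd : PySem.Int.floordiv a p = a / p := PySem.Int.floordiv_eq_ediv_of_pos (by omega)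
      rw [hfd]
      simp only [List.length_cons, List.cons_append]
      have hlen : L + 1 - ((Digs p (a / p)).length + 1) = L - (Digs p (a / p)).length := by
        omega
      rw [hlen]

lemma entriesAux_append (l1 l2 : List Int) : ∀ i : Nat,
    entriesAux (l1 ++ l2) i = entriesAux l2 (i + l1.length) ++ entriesAux l1 i := by
  induction l1 with
  | nil => intro i; simp [entriesAux]
  | cons d rest ih =>
    intro i
    simp only [List.cons_append, entriesAux, ih (i + 1), List.length_cons]
    rw [List.append_assoc]
    congr 2
    omega

lemma entriesAux_replicate (k : Nat) : ∀ i : Nat, entriesAux (List.replicate k 0) i = [] := by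
  induction k with
  | zero => intro i; simp [entriesAux]
  | succ k ih => intro i; simp [List.replicate_succ, entriesAux, ih]

lemma entries_snoc (la : List Int) (k : Nat) (c : Int) (hc : c ≠ 0) :
    entries (la ++ List.replicate k 0 ++ [c]) =
      (((la.length + k : Nat) : Int) + 1, c) :: entries la := by
  show entriesAux _ 0 = _
  rw [entriesAux_append, entriesAux_append]
  simp [entriesAux, entriesAux_replicate, hc, entries]

lemma Amain (p : Int) (hp : 2 ≤ p) :
    ∀ (N : Nat) (n : Int), 0 ≤ n → n.toNat ≤ N → ∀ (M : Nat) (d : PySem.Dict Int Int) (f : Nat),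
      n < p ^ M → (∀ j : Int, j ≤ (M : Int) → d.get? j = none) → n.toNat ≤ f →
      checkLoop p f n d = (entries (Digs p n)).foldl (fun d e => d.insert e.1 e.2) d := by
  intro N
  induction N with
  | zero =>
    intro n h0 hN M d f _ _ _
    have : n = 0 := by omega
    subst this
    rw [checkLoop_zero, Digs_zero, entries_nil]
    rfl
  | succ N ih =>
    intro n h0 hN M d f hM hfresh hf
    by_cases hz : n = 0
    · subst hz
      rw [checkLoop_zero, Digs_zero, entries_nil]
      rfl
    · have hn1 : 1 ≤ n.toNat := by omega
      -- leading power
      set L := Nat.log p.toNat n.toNat with hL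
      have hp2 : 2 ≤ p.toNat := by omega
      have hlow : p.toNat ^ L ≤ n.toNat := Nat.pow_log_le_self p.toNat (by omega)
      have hhigh : n.toNat < p.toNat ^ (L + 1) := Nat.lt_pow_succ_log_self (by omega) _
      have hcastp : ((p.toNat : Int)) = p := by omega
      have hlowI : p ^ L ≤ n := by
        have := Int.ofNat_le.mpr hlow
        push_cast at this
        rw [hcastp] at this
        omega
      have hhighI : n < p ^ (L + 1) := by
        have := Int.ofNat_lt.mpr hhigh
        push_cast at this
        rw [hcastp] at this
        omega
      have hP : (0:Int) < p ^ L := pow_pos (by omega) L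
      set c := n / p ^ L with hc
      set a := n % p ^ L with ha
      have hsplit : a + c * p ^ L = n := by
        rw [ha, hc]
        rw [mul_comm]
        exact Int.emod_add_mul_ediv n (p ^ L)
      have ha0 : 0 ≤ a := Int.emod_nonneg n (by omega)
      have haP : a < p ^ L := Int.emod_lt_of_pos n hP
      have hc1 : 1 ≤ c := by
        rw [hc]
        exact Int.le_ediv_of_mul_le hP (by omega)
      have hcp : c < p := by
        rw [hc]
        rw [Int.ediv_lt_iff_lt_mul hP, mul_comm, ← pow_succ]
        exact hhighI
      -- freshness of key L+1
      have hLM : L + 1 ≤ M := by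
        have : p ^ L < p ^ M := lt_of_le_of_lt hlowI hM
        have := (pow_lt_pow_iff_right₀ (by omega : (1:Int) < p)).mp this
        omega
      have hkey : d.get? ((L : Int) + 1) = none :=
        hfresh _ (by omega)
      -- rewrite n and apply Agroup with c = (c-1)+1
      obtain ⟨cN, hcN⟩ : ∃ cN : Nat, c = (cN : Int) + 1 := ⟨(c - 1).toNat, by omega⟩
      have hfc : cN + 1 ≤ f := by
        have hcPle : c * p ^ L ≤ n := by nlinarith
        have : c ≤ n := by nlinarith
        omega
      rw [← hsplit, hcN]
      rw [Agroup p L hp cN a d f ha0 haP (by rw [← hcN, hsplit]; exact hhighI) hkey hfc]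
      -- apply IH at a
      have haN : a.toNat ≤ N := by
        have : a < n := by nlinarith
        omega
      rw [ih a ha0 haN L (d.insert ((L : Int) + 1) ((cN : Int) + 1)) (f - (cN + 1)) haP
        (by
          intro j hj
          rw [PySem.Dict.get?_insert_of_ne _ _ (show j ≠ (L:Int)+1 by omega)]
          exact hfresh j (by omega))
        (by
          have hcPle : c * p ^ L ≤ n := by nlinarith
          have hac : a.toNat + (cN + 1) ≤ n.toNat := by
            have : a + c ≤ n := by nlinarith
            omega
          omega)]
      -- digits decomposition
      have hdig : Digs p (a + ((cN : Int) + 1) * p ^ L) =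
          Digs p a ++ List.replicate (L - (Digs p a).length) 0 ++ [(cN : Int) + 1] := by
        rw [← hcN]
        exact digLem p hp L a c ha0 haP hc1 hcp
      rw [hdig, entries_snoc _ _ _ (by omega)]
      rw [List.foldl_cons]
      congr 2
      have hlen := lenDigs p hp L a ha0 haP
      push_cast
      omega

lemma entriesAux_keyBound : ∀ (l : List Int) (i : Nat) (x : Int × Int),
    x ∈ entriesAux l i → (i : Int) < x.1 := by
  intro l
  induction l with
  | nil => intro i x hx; simp [entriesAux] at hx
  | cons d rest ih =>
    intro i x hx
    simp only [entriesAux, List.mem_append] at hx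
    rcases hx with hx | hx
    · have := ih (i + 1) x hx
      push_cast at this ⊢
      omega
    · by_cases hd : d ≠ 0
      · simp [hd] at hx
        subst hx
        simp
      · simp [hd] at hx

lemma entriesAux_pairwise : ∀ (l : List Int) (i : Nat),
    (entriesAux l i).Pairwise (fun u w => w.1 < u.1) := by
  intro l
  induction l with
  | nil => intro i; simp [entriesAux]
  | cons d rest ih =>
    intro i
    simp only [entriesAux]
    rw [List.pairwise_append]
    refine ⟨ih (i + 1), ?_, ?_⟩
    · by_cases hd : d ≠ 0 <;> simp [hd]
    · intro u hu w hw
      by_cases hd : d ≠ 0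
      · simp [hd] at hw
        subst hw
        have := entriesAux_keyBound rest (i + 1) u hu
        push_cast at this ⊢
        omega
      · simp [hd] at hw

lemma entriesAux_values : ∀ (l : List Int) (i : Nat),
    (entriesAux l i).map Prod.snd = (l.filter (fun x => !(x == 0))).reverse := by
  intro l
  induction l with
  | nil => intro i; simp [entriesAux]
  | cons d rest ih =>
    intro i
    simp only [entriesAux, List.map_append, ih (i + 1), List.filter_cons]
    by_cases hd : d ≠ 0 <;> simp [hd]

lemma Bloop (p : Int) : ∀ (f : Nat) (n o t r k : Int),
    checkAltLoop p f n o t r k =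
      (o + (cnt1 (digsF p f n) : Int), t + (cnt2 (digsF p f n) : Int),
       r + (cntO (digsF p f n) : Int), k + (cntN (digsF p f n) : Int)) := by
  intro f
  induction f with
  | zero => intro n o t r k; simp [checkAltLoop, digsF, cnt1, cnt2, cntO, cntN]
  | succ f ih =>
    intro n o t r k
    by_cases hn : n = 0
    · simp [checkAltLoop, digsF, hn, cnt1, cnt2, cntO, cntN]
    · simp only [checkAltLoop, digsF, if_neg hn]
      set d := PySem.Int.mod n p with hd
      set q := PySem.Int.floordiv n p with hq
      by_cases h0 : d ≠ 0
      · rw [if_pos h0]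
        by_cases h1 : d = 1
        · rw [if_pos h1, ih]
          simp [cnt1, cnt2, cntO, cntN, List.count_cons, List.countP_cons, h1]
          omega
        · rw [if_neg h1]
          by_cases h2 : d = 2
          · rw [if_pos h2, ih]
            simp [cnt1, cnt2, cntO, cntN, List.count_cons, List.countP_cons, h2]
            omega
          · rw [if_neg h2, ih]
            have h0' : ¬ d = 0 := h0
            simp [cnt1, cnt2, cntO, cntN, List.count_cons, List.countP_cons, h0', h1, h2]
            omega
      · rw [if_neg h0]
        simp only [ne_eq, not_not] at h0
        rw [ih]
        simp [cnt1, cnt2, cntO, cntN, List.count_cons, List.countP_cons, h0]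

lemma classFold : ∀ (V : List Int) (x y z : Int),
    V.foldl (fun c v =>
      if v = 1 then (c.1 + 1, c.2.1, c.2.2)
      else if v = 2 then (c.1, c.2.1 + 1, c.2.2)
      else (c.1, c.2.1, c.2.2 + 1)) (x, y, z) =
      (x + (cnt1 V : Int), y + (cnt2 V : Int), z + (cntE V : Int)) := by
  intro V
  induction V with
  | nil => intro x y z; simp [cnt1, cnt2, cntE]
  | cons v rest ih =>
    intro x y z
    simp only [List.foldl_cons]
    by_cases h1 : v = 1
    · subst h1
      rw [if_pos rfl, ih]
      simp [cnt1, cnt2, cntE, List.count_cons, List.countP_cons]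
      omega
    · by_cases h2 : v = 2
      · subst h2
        rw [if_neg (by omega), if_pos rfl, ih]
        simp [cnt1, cnt2, cntE, List.count_cons, List.countP_cons]
        omega
      · rw [if_neg h1, if_neg h2, ih]
        simp [cnt1, cnt2, cntE, List.countP_cons, h1, h2]
        omega

-- negative-base region: A counts n up to 0 under key 0; B's counters for 1 and 2 never move
lemma fdiv_one_neg (p : Int) (hp : p ≤ -2) : PySem.Int.floordiv 1 p = -1 := by
  have hmb := PySem.Int.mod_neg_bounds (a := 1) (b := p) (by omega)
  have heq := PySem.Int.floordiv_mul_add_mod 1 p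
  set q := PySem.Int.floordiv 1 p with hq
  set r := PySem.Int.mod 1 p with hr
  by_contra hne
  rcases lt_trichotomy q (-1) with h | h | h
  · -- q ≤ -2 : q*p ≥ -2p = 2|p|, but q*p = 1 - r < 1 - p
    have h2 : q + 2 ≤ 0 := by omega
    have : 0 ≤ (q + 2) * p := Int.mul_nonneg_of_nonpos_of_nonpos (a := q + 2) (b := p) (by omega) (by omega)
    nlinarith
  · exact hne h
  · -- q ≥ 0 : q*p ≤ 0 but q*p = 1 - r ≥ 1
    have : q * p ≤ 0 := mul_nonpos_of_nonneg_of_nonpos (by omega) (by omega)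
    nlinarith

lemma negStep (p n : Int) (hp : p ≤ -2) (hn : n < 0) (d : PySem.Dict Int Int) (f : Nat) :
    checkLoop p (f + 1) n d =
      checkLoop p f (n + 1)
        (if d.contains 0 = false then d.insert 0 1 else d.insert 0 (d.getD 0 0 + 1)) := by
  have hinner : checkInner p n (n.natAbs + 1) 1 0 = (1, 0) := by
    simp [checkInner, show ¬ (1:Int) ≤ n by omega]
  show (if n ≠ 0 then _ else d) = _
  rw [if_pos (by omega : n ≠ 0)]
  simp only [hinner, fdiv_one_neg p hp]
  norm_num

lemma negLoop (p : Int) (hp : p ≤ -2) : ∀ (k f : Nat) (v : Int), k ≤ f →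
    checkLoop p f (-(k : Int)) (PySem.Dict.empty.insert 0 v) =
      PySem.Dict.empty.insert 0 (v + (k : Int)) := by
  intro k
  induction k with
  | zero => intro f v h; simp [checkLoop_zero]
  | succ k ih =>
    intro f v h
    obtain ⟨f', rfl⟩ : ∃ f', f = f' + 1 := ⟨f - 1, by omega⟩
    rw [negStep p _ hp (by push_cast; omega) _ f']
    have hcont : (PySem.Dict.empty.insert (0:Int) v).contains 0 = true :=
      PySem.Dict.contains_insert_self _ _ _
    rw [hcont]
    have hgetD : (PySem.Dict.empty.insert (0:Int) v).getD 0 0 = v :=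
      PySem.Dict.getD_insert_self _ _ _ _
    simp only [Bool.true_eq_false, if_false, hgetD, PySem.Dict.insert_insert_self]
    have harg : -((k:Int) + 1) + 1 = -(k:Int) := by ring
    have hcast : (((k+1:Nat)):Int) = (k:Int) + 1 := by push_cast; ring
    rw [hcast, harg, ih f' (v + 1) (by omega)]
    congr 1
    ring

lemma altNeg (p : Int) (hp : p ≤ -2) : ∀ (f : Nat) (n o t r k : Int),
    (checkAltLoop p f n o t r k).1 = o ∧ (checkAltLoop p f n o t r k).2.1 = t := by
  intro f
  induction f with
  | zero => intro n o t r k; simp [checkAltLoop]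
  | succ f ih =>
    intro n o t r k
    by_cases hn : n = 0
    · simp [checkAltLoop, hn]
    · have hmb := PySem.Int.mod_neg_bounds (a := n) (b := p) (by omega)
      simp only [checkAltLoop, if_neg hn]
      set d := PySem.Int.mod n p with hd
      by_cases h0 : d ≠ 0
      · rw [if_pos h0, if_neg (by omega : ¬ d = 1), if_neg (by omega : ¬ d = 2)]
        exact ih _ _ _ _ _
      · rw [if_neg h0]
        exact ih _ _ _ _ _

-- assembly helpers
lemma checkA_pos (p n : Int) (hp : 2 ≤ p) (hn : 0 ≤ n) : check p n = check_alt p n := by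
  -- A side: the final dict is exactly the nonzero-digit entries
  have hfold : checkLoop p (n.natAbs + 1) n PySem.Dict.empty =
      (entries (Digs p n)).foldl (fun d e => d.insert e.1 e.2) PySem.Dict.empty := by
    apply Amain p hp n.toNat n hn le_rfl (n.toNat + 1) PySem.Dict.empty (n.natAbs + 1)
    · have h1 : (n.toNat : Int) < (2:Int) ^ n.toNat := by
        have := Nat.lt_two_pow_self (n := n.toNat)
        exact_mod_cast this
      have h2 : (2:Int) ^ n.toNat ≤ p ^ n.toNat := pow_le_pow_left₀ (by omega) hp _
      have h3 : p ^ n.toNat ≤ p ^ (n.toNat + 1) :=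
        pow_le_pow_right₀ (by omega) (by omega)
      omega
    · intro j _; exact PySem.Dict.get?_empty j
    · omega
  set E := entries (Digs p n) with hE
  have hpair : E.Pairwise (fun u w : Int × Int => w.1 < u.1) := entriesAux_pairwise _ 0
  have hnodE : (E.map Prod.fst).Nodup := by
    rw [List.Nodup, List.pairwise_map]
    exact hpair.imp (fun h => ne_of_gt h)
  set D := E.foldl (fun d e => d.insert e.1 e.2) PySem.Dict.empty with hD
  have hitems : D.items = E := by
    rw [hD, PySem.Dict.items_foldl_insert_fresh E Prod.fst Prod.snd PySem.Dict.empty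
      (fun a _ => PySem.Dict.contains_empty a.1) hnodE]
    show PySem.Dict.empty.items ++ E.map (fun a => (a.1, a.2)) = E
    have h1 : (PySem.Dict.empty : PySem.Dict Int Int).items = [] := rfl
    rw [h1]
    simp
  have hkeys : D.keys = E.map Prod.fst := by
    simp only [PySem.Dict.keys, hitems]
  have hknodup : D.keys.Nodup := by rw [hkeys]; exact hnodE
  have hsize : D.size = E.length := by
    simp only [PySem.Dict.size, hitems]
  -- the classification fold over the dict equals the fold over the digit values
  have hcfold : D.keys.foldl (fun c k =>
      if D.getD k 0 = 1 then (c.1 + 1, c.2.1, c.2.2)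
      else if D.getD k 0 = 2 then (c.1, c.2.1 + 1, c.2.2)
      else (c.1, c.2.1, c.2.2 + 1)) ((0 : Int), (0 : Int), (0 : Int)) =
      ((cnt1 (Digs p n) : Int), (cnt2 (Digs p n) : Int), (cntO (Digs p n) : Int)) := by
    rw [hkeys, List.foldl_map]
    rw [List.foldl_ext _ (fun (c : Int × Int × Int) (e : Int × Int) =>
        if e.2 = 1 then (c.1 + 1, c.2.1, c.2.2)
        else if e.2 = 2 then (c.1, c.2.1 + 1, c.2.2)
        else (c.1, c.2.1, c.2.2 + 1)) _
      (by
        intro acc e he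
        have : D.getD e.1 0 = e.2 :=
          PySem.Dict.getD_of_mem_items D (by rw [hitems]; simpa using he) hknodup 0
        rw [this])]
    rw [← List.foldl_map (f := Prod.snd) (g := fun (c : Int × Int × Int) (v : Int) =>
      if v = 1 then (c.1 + 1, c.2.1, c.2.2)
      else if v = 2 then (c.1, c.2.1 + 1, c.2.2)
      else (c.1, c.2.1, c.2.2 + 1))]
    rw [hE]
    simp only [entries]
    rw [entriesAux_values _ 0]
    rw [classFold]
    have hc1 : cnt1 ((Digs p n).filter (fun x => !(x == 0))).reverse = cnt1 (Digs p n) := by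
      unfold cnt1
      rw [List.count_reverse, List.count_filter (by norm_num)]
    have hc2 : cnt2 ((Digs p n).filter (fun x => !(x == 0))).reverse = cnt2 (Digs p n) := by
      unfold cnt2
      rw [List.count_reverse, List.count_filter (by norm_num)]
    have hcE : cntE ((Digs p n).filter (fun x => !(x == 0))).reverse = cntO (Digs p n) := by
      unfold cntE cntO
      rw [List.countP_reverse, List.countP_filter]
      apply List.countP_congr
      intro x _
      constructor
      · intro h
        simp only [Bool.and_eq_true] at h ⊢
        exact ⟨⟨h.2, h.1.1⟩, h.1.2⟩
      · intro h
        simp only [Bool.and_eq_true] at h ⊢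
        exact ⟨⟨h.1.2, h.2⟩, h.1.1⟩
    rw [hc1, hc2, hcE]
    simp
  have hlenE : E.length = cntN (Digs p n) := by
    have h1 : E.length = (E.map Prod.snd).length := by simp
    rw [h1, hE]
    simp only [entries]
    rw [entriesAux_values _ 0, List.length_reverse, cntN,
      List.countP_eq_length_filter]
  -- B side
  have hstab : digsF p (2 * n.natAbs + 2) n = Digs p n :=
    digsF_stable p hp n.toNat n hn le_rfl _ _ (by omega) (by omega)
  show check p n = check_alt p n
  unfold check check_alt
  simp only [hfold, hsize, hcfold, hlenE, Bloop, hstab]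
  split_ifs <;> omega

-- ===== VERDICT (by name: the statement is the Claim_ definition above) =====
theorem check_spec : Claim_equal_check := by
  unfold Claim_equal_check
  intro p n _ hpre
  unfold Spec_check
  by_cases hn0 : n = 0
  · subst hn0
    have hA : check p 0 = 0 := by
      unfold check
      rw [checkLoop_zero]
      simp [PySem.Dict.size_empty, PySem.Dict.keys_empty]
    have hB : check_alt p 0 = 0 := by
      unfold check_alt
      simp [checkAltLoop]
    rw [hA, hB]
  · unfold Pre_check at hpre
    rcases hpre with ⟨hp2, hn⟩ | h0 | ⟨hpneg, hnle⟩
    · exact checkA_pos p n hp2 hn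
    · exact absurd h0 hn0
    · -- negative base, negative n: both return 0
      have hnlt : n < 0 := by omega
      have hK : 1 ≤ n.natAbs := by omega
      have hA : check p n = 0 := by
        unfold check
        have hstep := negStep p n hpneg hnlt PySem.Dict.empty n.natAbs
        rw [hstep, PySem.Dict.contains_empty]
        simp only [if_true]
        have harg : n + 1 = -((n.natAbs - 1 : Nat) : Int) := by omega
        rw [harg, negLoop p hpneg (n.natAbs - 1) n.natAbs 1 (by omega)]
        have hval : (1 : Int) + ((n.natAbs - 1 : Nat) : Int) = (n.natAbs : Int) := by omega
        rw [hval]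
        set K := ((n.natAbs : Nat) : Int) with hKdef
        have hitems : (PySem.Dict.empty.insert (0:Int) K).items = [(0, K)] := by
          rw [PySem.Dict.items_insert_of_not_contains _ _ (PySem.Dict.contains_empty 0)]
          have he : (PySem.Dict.empty : PySem.Dict Int Int).items = [] := rfl
          rw [he]
          simp
        have hsize : (PySem.Dict.empty.insert (0:Int) K).size = 1 := by
          simp only [PySem.Dict.size, hitems, List.length_cons, List.length_nil]
        have hkeys : (PySem.Dict.empty.insert (0:Int) K).keys = [0] := by
          simp only [PySem.Dict.keys, hitems]
          rfl
        have hgetD : (PySem.Dict.empty.insert (0:Int) K).getD 0 0 = K :=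
          PySem.Dict.getD_insert_self _ _ _ _
        rw [hsize, hkeys]
        simp only [List.foldl_cons, List.foldl_nil, hgetD]
        split_ifs <;> simp_all
      have hB : check_alt p n = 0 := by
        simp only [check_alt]
        obtain ⟨h1, h2⟩ := altNeg p hpneg (2 * n.natAbs + 2) n 0 0 0 0
        split_ifs <;> omega
      rw [hA, hB]
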